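-- pv_equiv track=rewrite | github.com/ikrets/codejam-solutions | 2020_round_1a/2_pascal_walk.py | calc_exit_cost
-- ===== SOURCE A (Python) =====
-- import math
--
-- def comb(n, k):
--     return math.factorial(n) // math.factorial(k) // math.factorial(n - k)
--
-- def calc_exit_cost(n, k, last_action):
--     s = 0
--     if k == 0:
--         return 0
--
--     while k > 0:
--         k -= 1
--         s += comb(n, k)
--
--     return s
-- ===== SOURCE B (Python) =====
-- def calc_exit_cost(n, k, last_action):
--     s = 0
--     c = 1
--     for j in range(k):
--         s += c
--         c = c * (n - j) // (j + 1)
--     return s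
-- ===== Notes on version B (the rewrite author's own statement) =====
-- stated objective: faster
-- what changed: Replaces per-term factorial computations (three big factorials and two divisions for each of the k terms) by a single pass that maintains the current binomial coefficient via the multiplicative Pascal recurrence C(n,j+1)=C(n,j)*(n-j)//(j+1), accumulating the sum.
import Mathlib
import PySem

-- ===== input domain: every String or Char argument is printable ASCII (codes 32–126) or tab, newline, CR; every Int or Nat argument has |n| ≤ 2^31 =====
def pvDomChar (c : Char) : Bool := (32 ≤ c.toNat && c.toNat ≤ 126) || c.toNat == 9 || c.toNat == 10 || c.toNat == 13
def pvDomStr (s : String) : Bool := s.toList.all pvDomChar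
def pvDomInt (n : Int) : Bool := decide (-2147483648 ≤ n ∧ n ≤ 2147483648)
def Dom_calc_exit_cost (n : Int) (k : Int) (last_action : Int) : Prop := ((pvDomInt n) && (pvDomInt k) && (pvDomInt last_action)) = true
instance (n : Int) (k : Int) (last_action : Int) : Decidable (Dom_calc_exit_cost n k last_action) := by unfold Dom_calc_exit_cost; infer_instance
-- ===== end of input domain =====

-- B replaces A's per-term factorial formula by a single pass maintaining the binomial
-- coefficient with the Pascal multiplicative recurrence (objective: faster, O(k) vs O(k·n) multiplications).

-- ===== PORT A =====
-- comb(n, k) = n! // k! // (n-k)!  (math.factorial; negative arguments raise, excluded by Pre_)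
def combA (n k : Int) : Int :=
  PySem.Int.floordiv
    (PySem.Int.floordiv ((Nat.factorial n.toNat : Int)) ((Nat.factorial k.toNat : Int)))
    ((Nat.factorial (n - k).toNat : Int))

-- the 'while k > 0: k -= 1; s += comb(n, k)' loop, fuel = current k (which is ≥ 0 in the loop)
def calcA_loop (n : Int) : Nat → Int → Int
  | 0, s => s
  | m + 1, s => calcA_loop n m (s + combA n (m : Int))

def calc_exit_cost (n : Int) (k : Int) (last_action : Int) : Int :=
  if k = 0 then 0 else calcA_loop n k.toNat 0

-- ===== PORT B =====
def calc_exit_cost_alt (n : Int) (k : Int) (last_action : Int) : Int :=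
  ((PySem.List.pyRange 0 k 1).foldl
      (fun (sc : Int × Int) j => (sc.1 + sc.2, PySem.Int.floordiv (sc.2 * (n - j)) (j + 1)))
      (0, 1)).1

-- ===== PRECONDITION & SPEC =====
-- Pre_ excludes exactly the inputs where A raises ValueError: k > 0 with n negative or k > n+1
-- (math.factorial of a negative number).
def Pre_calc_exit_cost (n : Int) (k : Int) (last_action : Int) : Prop :=
  k ≤ 0 ∨ (0 ≤ n ∧ k ≤ n + 1)
instance (n : Int) (k : Int) (last_action : Int) : Decidable (Pre_calc_exit_cost n k last_action) := by
  unfold Pre_calc_exit_cost; infer_instance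

def pvWitness_calc_exit_cost : Int × Int × Int := (5, 3, 0)

def Spec_calc_exit_cost (n : Int) (k : Int) (last_action : Int) (out : Int) : Prop :=
  out = calc_exit_cost_alt n k last_action
instance (n : Int) (k : Int) (last_action : Int) (out : Int) : Decidable (Spec_calc_exit_cost n k last_action out) := by
  unfold Spec_calc_exit_cost; infer_instance

-- ===== CLAIM (what is proved, stated in full; the proofs are below) =====
def Claim_equal_calc_exit_cost : Prop := ∀ (n : Int) (k : Int) (last_action : Int), Dom_calc_exit_cost n k last_action → Pre_calc_exit_cost n k last_action → Spec_calc_exit_cost n k last_action (calc_exit_cost n k last_action)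

-- ===== LEMMAS AND PROOFS =====

-- partial sum of binomial coefficients, the common value of both loops
def pvS (n m : Nat) : Nat := ∑ j ∈ Finset.range m, n.choose j

lemma combA_eq (n j : Nat) (h : j ≤ n) : combA (n : Int) (j : Int) = (n.choose j : Int) := by
  have hsub : ((n : Int) - (j : Int)).toNat = n - j := by omega
  have h1 : n.choose j * j.factorial * (n - j).factorial = n.factorial :=
    Nat.choose_mul_factorial_mul_factorial h
  have h2 : n.factorial / j.factorial = n.choose j * (n - j).factorial := by
    have : n.factorial = (n.choose j * (n - j).factorial) * j.factorial := by rw [← h1]; ring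
    rw [this, Nat.mul_div_cancel _ (Nat.factorial_pos j)]
  have h3 : (n.choose j * (n - j).factorial) / (n - j).factorial = n.choose j :=
    Nat.mul_div_cancel _ (Nat.factorial_pos (n - j))
  unfold combA
  rw [Int.toNat_natCast, Int.toNat_natCast, hsub,
    PySem.Int.floordiv_natCast, PySem.Int.floordiv_natCast, h2, h3]

lemma calcA_loop_eq (n : Nat) : ∀ (m : Nat), m ≤ n + 1 → ∀ s : Int,
    calcA_loop (n : Int) m s = s + (pvS n m : Int) := by
  intro m
  induction m with
  | zero => intro _ s; simp [calcA_loop, pvS]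
  | succ m ih =>
    intro hm s
    have hmn : m ≤ n := by omega
    rw [calcA_loop, combA_eq n m hmn, ih (by omega)]
    simp [pvS, Finset.sum_range_succ]
    ring

lemma foldB_eq (n : Nat) : ∀ (m : Nat),
    ((List.range m).map (fun i : Nat => (i : Int))).foldl
      (fun (sc : Int × Int) j => (sc.1 + sc.2, PySem.Int.floordiv (sc.2 * ((n : Int) - j)) (j + 1)))
      (0, 1)
    = ((pvS n m : Int), (n.choose m : Int)) := by
  intro m
  induction m with
  | zero => simp [pvS]
  | succ m ih =>
    rw [List.range_succ, List.map_append, List.foldl_append, ih]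
    simp only [List.map_cons, List.map_nil, List.foldl_cons, List.foldl_nil]
    refine Prod.ext ?_ ?_
    · simp [pvS, Finset.sum_range_succ]
    · by_cases hmn : m ≤ n
      · have hc : ((n.choose m : Int)) * ((n : Int) - (m : Int)) = ((n.choose m * (n - m) : Nat) : Int) := by
          push_cast [Nat.cast_sub hmn]; ring
        have hrec : n.choose m * (n - m) = n.choose (m + 1) * (m + 1) :=
          (Nat.choose_succ_right_eq n m).symm
        have hm1 : ((m : Int) + 1) = ((m + 1 : Nat) : Int) := by push_cast; ring
        rw [hc, hrec, hm1, PySem.Int.floordiv_natCast,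
          Nat.mul_div_cancel _ (Nat.succ_pos m)]
      · have hz : n.choose m = 0 := Nat.choose_eq_zero_of_lt (by omega)
        have hz1 : n.choose (m + 1) = 0 := Nat.choose_eq_zero_of_lt (by omega)
        have hm1 : ((m : Int) + 1) = ((m + 1 : Nat) : Int) := by push_cast; ring
        rw [hz, hz1]
        simp only [Nat.cast_zero, zero_mul, hm1]
        rw [show (0 : Int) = ((0 : Nat) : Int) from rfl, PySem.Int.floordiv_natCast]
        simp

lemma alt_eq_sum (N K : Nat) (la : Int) :
    calc_exit_cost_alt (N : Int) (K : Int) la = (pvS N K : Int) := by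
  unfold calc_exit_cost_alt
  rw [PySem.List.pyRange_one]
  have h1 : (((K : Nat) : Int) - 0).toNat = K := by omega
  have h2 : (fun i : Nat => (0 : Int) + (i : Int)) = (fun i : Nat => (i : Int)) := by
    funext i; ring
  rw [h1, h2, foldB_eq N K]

-- ===== VERDICT (by name: the statement is the Claim_ definition above) =====
theorem calc_exit_cost_spec : Claim_equal_calc_exit_cost := by
  intro n k la _ hpre
  unfold Spec_calc_exit_cost calc_exit_cost
  by_cases hk0 : k ≤ 0
  · have hr : PySem.List.pyRange 0 k 1 = [] := PySem.List.pyRange_one_eq_nil (by omega)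
    have htn : k.toNat = 0 := by omega
    unfold calc_exit_cost_alt
    rw [hr, htn]
    simp [calcA_loop]
  · have hk : 0 < k := by omega
    rcases hpre with h | ⟨hn, hkn⟩
    · omega
    · obtain ⟨N, rfl⟩ := Int.eq_ofNat_of_zero_le hn
      obtain ⟨K, rfl⟩ := Int.eq_ofNat_of_zero_le (le_of_lt hk)
      rw [alt_eq_sum N K la, if_neg (by omega)]
      rw [Int.toNat_natCast, calcA_loop_eq N K (by omega) 0]
      simp
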